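-- pv_equiv track=rewrite | github.com/xsarmalenka/AdventOfCode | Advent of Code 2024/Day 9/day9_part2.py | find_dots_array
-- ===== SOURCE A (Python) =====
-- def find_dots_array(block, size):
--     current_count = 0
--     pos = -1
--
--     for i, item in enumerate(block):
--         if item == ".":
--             current_count += 1
--             if pos == -1:
--                 pos = i
--         else:
--             current_count = 0
--             pos = -1
--
--         if current_count == size:
--             break
--         else:
--             if i == len(block)-1: pos = -1
--
--     return pos
-- ===== SOURCE B (Python) =====
-- def find_dots_array(block, size):
--     if size <= 0:
--         return -1
--     i, n = 0, len(block)
--     while i < n: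
--         if block[i] == ".":
--             j = i
--             while j < n and block[j] == ".":
--                 j += 1
--             if j - i >= size:
--                 return i
--             i = j
--         else:
--             i += 1
--     return -1
-- ===== Notes on version B (the rewrite author's own statement) =====
-- stated objective: alternative
-- what changed: B replaces A's per-element counter/reset scan (with an end-of-list pos patch and a break) by a two-pointer run scanner: an outer index loop that, on hitting a dot, jumps a second pointer to the end of the dot run, compares the run length against size, and otherwise skips the whole run; size<=0 is handled by an upfront guard since no run can match.
import Mathlib
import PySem

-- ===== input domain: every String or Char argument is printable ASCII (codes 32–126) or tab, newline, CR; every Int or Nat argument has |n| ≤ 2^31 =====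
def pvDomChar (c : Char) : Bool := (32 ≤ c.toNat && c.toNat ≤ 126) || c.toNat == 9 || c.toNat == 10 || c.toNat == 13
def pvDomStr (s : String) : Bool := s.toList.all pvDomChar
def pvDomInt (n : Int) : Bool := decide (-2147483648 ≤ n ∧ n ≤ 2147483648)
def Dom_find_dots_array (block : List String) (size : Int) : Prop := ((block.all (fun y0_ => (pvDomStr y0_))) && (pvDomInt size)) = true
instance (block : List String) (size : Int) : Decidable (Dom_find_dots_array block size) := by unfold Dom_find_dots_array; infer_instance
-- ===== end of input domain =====

-- B scans maximal dot runs with two pointers instead of A's per-element counter with reset and break; same O(n) cost, different decomposition.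

-- ===== PORT A =====
-- literal port of A's for-loop over enumerate(block) with state (current_count, pos) and break
def pvLoopA (size n : Int) : List (Int × String) → Int → Int → Int
  | [], _, pos => pos
  | (i, item) :: rest, count, pos =>
    let count' := if item == "." then count + 1 else 0
    let pos' := if item == "." then (if pos == -1 then i else pos) else -1
    if count' == size then pos'
    else pvLoopA size n rest count' (if i == n - 1 then -1 else pos')

def find_dots_array (block : List String) (size : Int) : Int :=
  pvLoopA size (block.length : Int) (PySem.List.enumerate block) 0 (-1)

-- ===== PORT B =====
-- length of the leading run of "." (B's inner while loop advancing j)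
def pvDotRun : List String → Nat
  | [] => 0
  | x :: rest => if x == "." then 1 + pvDotRun rest else 0

-- B's outer while loop over positions, skipping a whole dot run at once
def pvLoopB (size : Int) : List String → Int → Int
  | [], _ => -1
  | x :: rest, i =>
    if x == "." then
      let d := 1 + pvDotRun rest
      if size ≤ (d : Int) then i
      else pvLoopB size (rest.drop (pvDotRun rest)) (i + (d : Int))
    else pvLoopB size rest (i + 1)
termination_by l _ => l.length
decreasing_by all_goals simp_all

def find_dots_array_alt (block : List String) (size : Int) : Int :=
  if size ≤ 0 then -1 else pvLoopB size block 0

-- ===== PRECONDITION & SPEC =====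
def Spec_find_dots_array (block : List String) (size : Int) (out : Int) : Prop := out = find_dots_array_alt block size
instance (block : List String) (size : Int) (out : Int) : Decidable (Spec_find_dots_array block size out) := by unfold Spec_find_dots_array; infer_instance

-- ===== CLAIM (what is proved, stated in full; the proofs are below) =====
def Claim_equal_find_dots_array : Prop := ∀ (block : List String) (size : Int), Dom_find_dots_array block size → Spec_find_dots_array block size (find_dots_array block size)

-- ===== LEMMAS AND PROOFS =====

-- with size ≤ 0 the break never fires on a dot, so A returns -1 (pos is wiped at the last index)
theorem pvLoopA_nonpos (size n : Int) (hs : size ≤ 0) :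
    ∀ (l : List String) (k count pos : Int), 0 ≤ count → n = k + l.length →
      pvLoopA size n (PySem.List.enumerate l k) count pos = if l = [] then pos else -1 := by
  intro l
  induction l with
  | nil => intro k count pos _ _; simp [PySem.List.enumerate_nil, pvLoopA]
  | cons x rest ih =>
    intro k count pos hc hn
    rw [PySem.List.enumerate_cons]
    simp only [pvLoopA]
    by_cases hx : x == "."
    · simp only [hx]
      have h1 : ((count + 1 == size) = false) := by
        simp only [beq_eq_false_iff_ne]; omega
      simp only [h1, if_true, Bool.false_eq_true, if_false]
      rw [ih (k+1) (count+1) _ (by omega) (by simp only [List.length_cons] at hn; push_cast at hn ⊢; omega)]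
      by_cases hr : rest = []
      · subst hr
        have : (k == n - 1) = true := by
          simp only [beq_iff_eq]; simp at hn; omega
        simp [this]
      · simp [hr]
    · simp only [hx, Bool.false_eq_true, if_false]
      by_cases h0 : ((0:Int) == size) = true
      · simp [h0]
      · simp only [h0, Bool.false_eq_true, if_false]
        rw [ih (k+1) 0 _ (by omega) (by simp only [List.length_cons] at hn; push_cast at hn ⊢; omega)]
        by_cases hr : rest = []
        · subst hr; simp
        · simp [hr]

-- joint induction: from a fresh state A's loop behaves like B's run scanner (first conjunct);
-- from mid-run state (count = c ≥ 1, pos = p the run start) A finishes the current run like B would (second conjunct)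
theorem pvCombo (size n : Int) (hs : 1 ≤ size) :
    ∀ m : Nat, ∀ l : List String, l.length ≤ m →
      (∀ k : Int, 0 ≤ k → n = k + l.length →
         pvLoopA size n (PySem.List.enumerate l k) 0 (-1) = pvLoopB size l k)
      ∧ (∀ k c p : Int, 0 ≤ k → 1 ≤ c → c < size → 0 ≤ p → n = k + l.length → l ≠ [] →
         pvLoopA size n (PySem.List.enumerate l k) c p =
           if size ≤ c + (pvDotRun l : Int) then p
           else if pvDotRun l = l.length then (-1 : Int)
           else pvLoopB size (l.drop (pvDotRun l)) (k + (pvDotRun l : Int))) := by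
  intro m
  induction m with
  | zero =>
    intro l hl
    have hnil : l = [] := List.length_eq_zero_iff.mp (Nat.le_zero.mp hl)
    subst hnil
    constructor
    · intro k _ _; simp [PySem.List.enumerate_nil, pvLoopA, pvLoopB]
    · intro k c p _ _ _ _ _ hne; exact absurd rfl hne
  | succ m ih =>
    intro l hl
    cases l with
    | nil =>
      constructor
      · intro k _ _; simp [PySem.List.enumerate_nil, pvLoopA, pvLoopB]
      · intro k c p _ _ _ _ _ hne; exact absurd rfl hne
    | cons x rest =>
      have hrest := ih rest (by simpa using Nat.lt_succ_iff.mp (Nat.lt_of_lt_of_le (Nat.lt_succ_of_le le_rfl) (by simpa using hl)))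
      constructor
      · -- fresh state
        intro k hk hn
        simp only [List.length_cons] at hn
        rw [PySem.List.enumerate_cons]
        simp only [pvLoopA]
        by_cases hx : (x == ".") = true
        · simp only [hx, if_true]
          rw [pvLoopB.eq_def]
          simp only [hx, if_true]
          by_cases h1 : ((0:Int) + 1 == size) = true
          · -- size = 1: break immediately, B sees a run of length ≥ 1
            have hsz : size = 1 := by have := beq_iff_eq.mp h1; omega
            subst hsz
            have hfit : (1:Int) ≤ 1 + (pvDotRun rest : Int) := by omega
            simp [hfit]
          · have hsz : (2:Int) ≤ size := by
              have h2 : (0:Int) + 1 ≠ size := by simpa using h1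
              omega
            simp only [h1, Bool.false_eq_true, if_false]
            by_cases hr : rest = []
            · subst hr
              have hk1 : (k == n - 1) = true := by simp only [beq_iff_eq]; simp at hn; omega
              have hns : ¬ size ≤ (1 : Int) := by omega
              simp [hk1, PySem.List.enumerate_nil, pvLoopA, pvDotRun, pvLoopB, hns]
            · have hk1 : (k == n - 1) = false := by
                simp only [beq_eq_false_iff_ne]
                have : 1 ≤ rest.length := Nat.one_le_iff_ne_zero.mpr (by simpa using hr)
                push_cast at hn; omega
              simp only [hk1, Bool.false_eq_true, if_false]
              have hrun := hrest.2 (k+1) 1 k (by omega) le_rfl (by omega) hk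
                (by push_cast at hn ⊢; omega) hr
              have h01 : (0:Int) + 1 = 1 := by norm_num
              have hpos : (if ((-1 : Int) == -1) = true then k else (-1:Int)) = k := by simp
              rw [h01, hpos, hrun]
              by_cases hfit : size ≤ 1 + (pvDotRun rest : Int)
              · rw [if_pos hfit, if_pos (show size ≤ ((1 + pvDotRun rest : Nat) : Int) from by push_cast; omega)]
              · rw [if_neg hfit, if_neg (show ¬ size ≤ ((1 + pvDotRun rest : Nat) : Int) from by push_cast; omega)]
                by_cases hall : pvDotRun rest = rest.length
                · rw [if_pos hall]
                  simp [hall, List.drop_length, pvLoopB]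
                · rw [if_neg hall]
                  have hc2 : k + ((1 + pvDotRun rest : Nat) : Int) = k + 1 + (pvDotRun rest : Int) := by push_cast; ring
                  rw [hc2]
        · -- non-dot head: state resets, B steps to the next position
          simp only [hx, Bool.false_eq_true, if_false]
          have h0 : ((0:Int) == size) = false := by simp only [beq_eq_false_iff_ne]; omega
          simp only [h0, Bool.false_eq_true, if_false, ite_self]
          rw [hrest.1 (k+1) (by omega) (by push_cast at hn ⊢; omega)]
          have hx' : ¬ x = "." := by simpa using hx
          conv_rhs => rw [pvLoopB.eq_def]
          simp [hx']
      · -- mid-run state: count = c ≥ 1, pos = p (the start of the current run)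
        intro k c p hk hc hcs hp hn _
        simp only [List.length_cons] at hn
        rw [PySem.List.enumerate_cons]
        simp only [pvLoopA]
        by_cases hx : (x == ".") = true
        · simp only [hx, if_true]
          have hpne : (p == -1) = false := by simp only [beq_eq_false_iff_ne]; omega
          simp only [hpne, Bool.false_eq_true, if_false]
          have hdr : pvDotRun (x :: rest) = 1 + pvDotRun rest := by
            rw [pvDotRun]; simp [hx]
          by_cases h1 : (c + 1 == size) = true
          · have hsz : c + 1 = size := beq_iff_eq.mp h1
            have : size ≤ c + (pvDotRun (x :: rest) : Int) := by rw [hdr]; push_cast; omega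
            simp [h1, this]
          · have hlt : c + 1 < size := by
              have h2 : c + 1 ≠ size := by simpa using h1
              omega
            simp only [h1, Bool.false_eq_true, if_false]
            by_cases hr : rest = []
            · subst hr
              have hk1 : (k == n - 1) = true := by simp only [beq_iff_eq]; simp at hn; omega
              simp only [hk1, if_true, PySem.List.enumerate_nil, pvLoopA]
              have hdr1 : pvDotRun (x :: ([] : List String)) = 1 := by rw [hdr]; rfl
              rw [hdr1]
              rw [if_neg (by push_cast; omega), if_pos (by simp)]
            · have hk1 : (k == n - 1) = false := by
                simp only [beq_eq_false_iff_ne]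
                have : 1 ≤ rest.length := Nat.one_le_iff_ne_zero.mpr (by simpa using hr)
                push_cast at hn; omega
              simp only [hk1, Bool.false_eq_true, if_false]
              have hrun := hrest.2 (k+1) (c+1) p (by omega) (by omega) hlt hp
                (by push_cast at hn ⊢; omega) hr
              rw [hrun, hdr]
              by_cases hfit : size ≤ c + 1 + (pvDotRun rest : Int)
              · rw [if_pos hfit, if_pos (show size ≤ c + ((1 + pvDotRun rest : Nat) : Int) from by push_cast; omega)]
              · rw [if_neg hfit, if_neg (show ¬ size ≤ c + ((1 + pvDotRun rest : Nat) : Int) from by push_cast; omega)]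
                by_cases hall : pvDotRun rest = rest.length
                · rw [if_pos hall, if_pos (show 1 + pvDotRun rest = (x :: rest).length from by simp only [List.length_cons]; omega)]
                · rw [if_neg hall, if_neg (show ¬ (1 + pvDotRun rest = (x :: rest).length) from by simp [List.length_cons]; omega)]
                  have hdrop : (x :: rest).drop (1 + pvDotRun rest) = rest.drop (pvDotRun rest) := by
                    simp [List.drop_succ_cons, Nat.add_comm]
                  rw [hdrop]
                  have : k + ((1 + pvDotRun rest : Nat) : Int) = k + 1 + (pvDotRun rest : Int) := by push_cast; ring
                  rw [this]
        · -- non-dot head while mid-run: reset, then fresh scan of the tail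
          simp only [hx, Bool.false_eq_true, if_false]
          have h0 : ((0:Int) == size) = false := by simp only [beq_eq_false_iff_ne]; omega
          simp only [h0, Bool.false_eq_true, if_false, ite_self]
          rw [hrest.1 (k+1) (by omega) (by push_cast at hn ⊢; omega)]
          have hdr0 : pvDotRun (x :: rest) = 0 := by rw [pvDotRun]; simp [hx]
          rw [hdr0]
          rw [if_neg (by omega), if_neg (by simp)]
          simp only [List.drop_zero, Nat.cast_zero, add_zero]
          have hx' : ¬ x = "." := by simpa using hx
          conv_rhs => rw [pvLoopB.eq_def]
          simp [hx']

theorem find_dots_array_spec : Claim_equal_find_dots_array := by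
  intro block size _
  unfold Spec_find_dots_array find_dots_array find_dots_array_alt
  by_cases hs : size ≤ 0
  · rw [if_pos hs]
    rw [pvLoopA_nonpos size _ hs block 0 0 (-1) le_rfl (by simp)]
    by_cases hb : block = [] <;> simp [hb]
  · rw [if_neg hs]
    exact ((pvCombo size _ (by omega) block.length block le_rfl).1 0 le_rfl (by simp))
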